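-- pv_equiv track=rewrite | github.com/stolenpromises/6.00.2x | unit_1/problem_set_1/problem set 1.py | greedy_cow_transport_modern
-- ===== SOURCE A (Python) =====
-- def greedy_cow_transport_modern(input_dict, cargo_limit):
--     """
--     Return a multi-part transport operation configuration via a
--     greedy algorithm implementation which may or may not be optimal.
--
--     Parameters
--     ----------
--     input_dict : dict
--         dictionary matching payload item names to weights(in tons).
--             example entry/types/max values:
--                 {unique_payload: 100}
--                 {str: int}
--                 {n/a: 0-100}
--     cargo_limit : int
--         weight limit per transport operation
--
--     Returns
--     -------
--     cargo_history : list
--         A list of lists. Each inner list represents a round trip transport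
--         operation. Payloads are identified via unique_payload parameter passed
--         in at runtime. Each trip orders heavier payloads first. Arbitrary
--         tiebreak and trip order.
--             example:
--                 cargo_history = [[pl1, pl2], [pl3, pl4]]
--     """
--     # helper function to allow for sorting the dictionary by value
--     def valuetarget(x):
--         """Return dictionary item values."""
--         return x[1]
--
--     # convert the input dictionary into a dictionary sorted by weight
--     sorted_dict = {key: value for (key, value) in sorted(input_dict.items(),
--                                                          key=valuetarget,
--                                                          reverse=True)}
--     cargo_history = []  # initiate the list of lists
--     # run a takeoff loop as long as there is remaining payload
--     while sorted_dict != {}: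
--         # plane landed empty
--         cargo = []
--         cargo_weight = cargo_limit
--         # load payload biggest to smallest and don't exceed the cargo limit
--         for i in sorted_dict:  # loop over remaining payload
--             if sorted_dict[i] <= cargo_weight:  # cargo room for payload
--                 cargo.append(i)  # add the payload to cargo
--                 cargo_weight -= sorted_dict[i]  # add the payload weight
--         for i in cargo:  # remove loaded payload
--             del(sorted_dict[str(i)])  # payload accounted for... remove
--         cargo_history.append(cargo)  # record the delivery
--     return cargo_history
-- ===== SOURCE B (Python) =====
-- def greedy_cow_transport_modern(input_dict, cargo_limit):
--     """Item-centric first-fit over the weight-sorted payloads: each item is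
--     placed once into the first open trip with enough remaining capacity
--     (or opens a new trip), instead of re-scanning the remaining payload
--     trip by trip."""
--     items = sorted(input_dict.items(), key=lambda x: x[1], reverse=True)
--     bins = []  # each bin: [list_of_payload_names, remaining_capacity]
--     for key, weight in items:
--         for b in bins:
--             if weight <= b[1]:
--                 b[0].append(key)
--                 b[1] -= weight
--                 break
--         else:
--             bins.append([[key], cargo_limit - weight])
--     return [b[0] for b in bins]
-- ===== Notes on version B (the rewrite author's own statement) =====
-- stated objective: alternative
-- what changed: Replaced A's trip-by-trip loop (which re-scans the whole remaining dictionary for every trip and then deletes the loaded keys) by a single item-centric first-fit-decreasing pass that places each sorted item once into the first open trip with enough remaining capacity; Pre_ excludes inputs where some dict value exceeds cargo_limit, on which A loops forever and returns nothing.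
import Mathlib
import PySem

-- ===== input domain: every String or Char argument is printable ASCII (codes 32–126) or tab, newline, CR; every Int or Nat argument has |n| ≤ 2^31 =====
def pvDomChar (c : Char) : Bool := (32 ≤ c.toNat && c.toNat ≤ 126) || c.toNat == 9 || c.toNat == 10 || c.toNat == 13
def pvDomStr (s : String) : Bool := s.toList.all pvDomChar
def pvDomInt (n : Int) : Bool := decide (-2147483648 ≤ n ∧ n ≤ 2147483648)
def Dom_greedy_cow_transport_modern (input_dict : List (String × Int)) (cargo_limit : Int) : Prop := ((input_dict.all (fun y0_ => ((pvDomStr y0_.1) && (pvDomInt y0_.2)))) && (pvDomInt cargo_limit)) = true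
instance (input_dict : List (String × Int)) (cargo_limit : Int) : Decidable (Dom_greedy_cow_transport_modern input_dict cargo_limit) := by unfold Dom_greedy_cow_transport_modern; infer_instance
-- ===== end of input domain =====

-- B replaces A's repeated trip-by-trip re-scan of the remaining dictionary by one
-- item-centric first-fit pass over the sorted items (alternative decomposition, same result).
-- Neither version mutates input_dict.

-- Shared preprocessing, identical in both Pythons: sorted(input_dict.items(), key=lambda x: x[1], reverse=True).
-- (input_dict.items() in insertion order with last-value-wins = (PySem.Dict.ofList input_dict).items.
-- A additionally rebuilds a dict from this already-key-unique sorted list and then iterates its keys,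
-- looking each value up: since the keys are distinct, that is exactly iterating the sorted pair list.)
def pvSortedItems (input_dict : List (String × Int)) : List (String × Int) :=
  PySem.List.sorted (PySem.Dict.ofList input_dict).items (fun p => p.2) true

-- ===== PORT A =====
-- the inner 'for i in sorted_dict: if sorted_dict[i] <= cargo_weight: cargo.append(i); cargo_weight -= …'
def pvLoadA : List (String × Int) → Int → List String
  | [], _ => []
  | (k, v) :: t, cap => if v ≤ cap then k :: pvLoadA t (cap - v) else pvLoadA t cap

-- the 'while sorted_dict != {}' loop; the 'for i in cargo: del(sorted_dict[str(i)])' pass deletes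
-- exactly the pairs whose key is in cargo, preserving order (str(i) = i for string keys).
-- Python's while loop has no fuel; it terminates iff every dict value ≤ cargo_limit (Pre_), and under
-- Pre_ each pass removes at least one pair, so fuel = length + 1 reproduces it exactly on Pre_.
def pvTripsA : Nat → List (String × Int) → Int → List (List String)
  | 0, _, _ => []
  | n + 1, rem, limit =>
    if rem = [] then []
    else
      let cargo := pvLoadA rem limit
      cargo :: pvTripsA n (rem.filter (fun p => ¬ cargo.contains p.1)) limit

def greedy_cow_transport_modern (input_dict : List (String × Int)) (cargo_limit : Int) : List (List String) :=
  let sd := pvSortedItems input_dict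
  pvTripsA (sd.length + 1) sd cargo_limit

-- ===== PORT B =====
-- place one (key, weight) into the first bin with enough remaining capacity, else open a new bin
def pvPlace (limit : Int) : List (List String × Int) → String → Int → List (List String × Int)
  | [], k, v => [([k], limit - v)]
  | (its, cap) :: rest, k, v =>
    if v ≤ cap then (its ++ [k], cap - v) :: rest else (its, cap) :: pvPlace limit rest k v

def greedy_cow_transport_modern_alt (input_dict : List (String × Int)) (cargo_limit : Int) : List (List String) :=
  let sd := pvSortedItems input_dict
  (sd.foldl (fun bins p => pvPlace cargo_limit bins p.1 p.2) []).map (fun b => b.1)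

-- ===== PRECONDITION & SPEC =====
-- Pre_ excludes exactly the inputs on which A's while loop never terminates (so A returns nothing):
-- some value of the dictionary exceeds cargo_limit, so that heaviest remaining item is never loaded.
def Pre_greedy_cow_transport_modern (input_dict : List (String × Int)) (cargo_limit : Int) : Prop :=
  ∀ v ∈ (PySem.Dict.ofList input_dict).values, v ≤ cargo_limit
instance (input_dict : List (String × Int)) (cargo_limit : Int) : Decidable (Pre_greedy_cow_transport_modern input_dict cargo_limit) := by unfold Pre_greedy_cow_transport_modern; infer_instance

def pvWitness_greedy_cow_transport_modern : (List (String × Int)) × Int :=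
  ([("a", 3), ("b", 2), ("c", 4)], 5)

def Spec_greedy_cow_transport_modern (input_dict : List (String × Int)) (cargo_limit : Int) (out : List (List String)) : Prop := out = greedy_cow_transport_modern_alt input_dict cargo_limit
instance (input_dict : List (String × Int)) (cargo_limit : Int) (out : List (List String)) : Decidable (Spec_greedy_cow_transport_modern input_dict cargo_limit out) := by unfold Spec_greedy_cow_transport_modern; infer_instance

-- ===== CLAIM (what is proved, stated in full; the proofs are below) =====
def Claim_equal_greedy_cow_transport_modern : Prop := ∀ (input_dict : List (String × Int)) (cargo_limit : Int), Dom_greedy_cow_transport_modern input_dict cargo_limit → Pre_greedy_cow_transport_modern input_dict cargo_limit → Spec_greedy_cow_transport_modern input_dict cargo_limit (greedy_cow_transport_modern input_dict cargo_limit)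

-- ===== LEMMAS AND PROOFS =====

-- the pairs pvLoadA rejects, in order
def pvReject : List (String × Int) → Int → List (String × Int)
  | [], _ => []
  | (k, v) :: t, cap => if v ≤ cap then pvReject t (cap - v) else (k, v) :: pvReject t cap

lemma pvReject_sublist (L : List (String × Int)) (cap : Int) : (pvReject L cap).Sublist L := by
  induction L generalizing cap with
  | nil => simp [pvReject]
  | cons p t ih =>
    obtain ⟨k, v⟩ := p
    by_cases h : v ≤ cap
    · simpa [pvReject, h] using (ih (cap - v)).cons (k, v)
    · simpa [pvReject, h] using ih cap

lemma pvLoadA_mem {L : List (String × Int)} {cap : Int} {x : String}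
    (hx : x ∈ pvLoadA L cap) : x ∈ L.map Prod.fst := by
  induction L generalizing cap with
  | nil => simp [pvLoadA] at hx
  | cons p t ih =>
    obtain ⟨k, v⟩ := p
    by_cases h : v ≤ cap <;> simp [pvLoadA, h] at hx <;> simp
    · rcases hx with rfl | hx
      · exact Or.inl rfl
      · exact Or.inr (by simpa using ih hx)
    · exact Or.inr (by simpa using ih hx)

-- A's deletion pass equals the positional complement of the greedy scan (keys distinct)
lemma remove_eq_reject (L : List (String × Int)) (cap : Int)
    (hnd : (L.map Prod.fst).Nodup) :
    L.filter (fun p => ¬ (pvLoadA L cap).contains p.1) = pvReject L cap := by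
  induction L generalizing cap with
  | nil => simp [pvReject]
  | cons p t ih =>
    obtain ⟨k, v⟩ := p
    simp only [List.map_cons, List.nodup_cons] at hnd
    obtain ⟨hk, hnd'⟩ := hnd
    by_cases h : v ≤ cap
    · simp only [pvLoadA, pvReject, h, if_pos]
      rw [List.filter_cons, if_neg (by simp), ← ih (cap - v) hnd']
      refine List.filter_congr ?_
      intro p hp
      have hne : p.1 ≠ k := fun hek => hk (hek ▸ List.mem_map_of_mem hp)
      simp [hne]
    · simp only [pvLoadA, pvReject, h, if_false]
      rw [List.filter_cons]
      have hkout : (pvLoadA t cap).contains k = false := by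
        by_contra hc
        simp only [Bool.not_eq_false, List.contains_eq_mem, decide_eq_true_eq] at hc
        exact hk (pvLoadA_mem hc)
      simp only [hkout]
      rw [ih cap hnd']
      simp

-- the crux: folding first-fit over L with an open head bin fills that bin with
-- exactly the greedy scan of L and cascades the rejected items into the remaining bins
lemma foldPlace_cons (limit : Int) (L : List (String × Int)) :
    ∀ (its : List String) (cap : Int) (rest : List (List String × Int)),
    ∃ c, L.foldl (fun bins p => pvPlace limit bins p.1 p.2) ((its, cap) :: rest)
      = (its ++ pvLoadA L cap, c) ::
        (pvReject L cap).foldl (fun bins p => pvPlace limit bins p.1 p.2) rest := by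
  induction L with
  | nil => intro its cap rest; exact ⟨cap, by simp [pvLoadA, pvReject]⟩
  | cons p t ih =>
    intro its cap rest
    obtain ⟨k, v⟩ := p
    by_cases h : v ≤ cap
    · obtain ⟨c, hc⟩ := ih (its ++ [k]) (cap - v) rest
      refine ⟨c, ?_⟩
      simp only [List.foldl_cons, pvPlace, h, if_pos, pvLoadA, pvReject]
      rw [hc]; simp
    · obtain ⟨c, hc⟩ := ih its cap (pvPlace limit rest k v)
      refine ⟨c, ?_⟩
      simp only [List.foldl_cons, pvPlace, h, if_false, pvLoadA, pvReject]
      rw [hc]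

-- one step of B equals one trip of A
lemma ff_step (limit : Int) (k : String) (v : Int) (t : List (String × Int)) (hv : v ≤ limit) :
    (((k, v) :: t).foldl (fun bins p => pvPlace limit bins p.1 p.2) []).map (fun b => b.1)
      = pvLoadA ((k, v) :: t) limit ::
        ((pvReject ((k, v) :: t) limit).foldl
          (fun bins p => pvPlace limit bins p.1 p.2) []).map (fun b => b.1) := by
  obtain ⟨c, hc⟩ := foldPlace_cons limit t [k] (limit - v) []
  simp only [List.foldl_cons, pvPlace, pvLoadA, pvReject, hv, if_pos]
  rw [hc]; simp

-- the main induction: with enough fuel, A's trip loop equals B's single pass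
lemma trips_eq_ff (limit : Int) :
    ∀ (n : Nat) (L : List (String × Int)), L.length < n → (L.map Prod.fst).Nodup →
    (∀ p ∈ L, p.2 ≤ limit) →
    pvTripsA n L limit
      = (L.foldl (fun bins p => pvPlace limit bins p.1 p.2) []).map (fun b => b.1) := by
  intro n
  induction n with
  | zero => intro L h; omega
  | succ n ih =>
    intro L hlen hnd hb
    match L with
    | [] => simp [pvTripsA]
    | (k, v) :: t =>
      have hv : v ≤ limit := hb (k, v) (by simp)
      rw [ff_step limit k v t hv]
      simp only [pvTripsA, if_neg (List.cons_ne_nil _ _)]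
      rw [remove_eq_reject ((k, v) :: t) limit hnd]
      congr 1
      have hsub : (pvReject ((k, v) :: t) limit).Sublist t := by
        simpa [pvReject, hv] using pvReject_sublist t (limit - v)
      exact ih (pvReject ((k, v) :: t) limit)
        (lt_of_le_of_lt hsub.length_le (by simpa using hlen))
        ((hsub.map Prod.fst).nodup hnd.of_cons)
        (fun p hp => hb p (List.mem_cons_of_mem _ (hsub.subset hp)))

-- ===== VERDICT (by name: the statement is the Claim_ definition above) =====
theorem greedy_cow_transport_modern_spec : Claim_equal_greedy_cow_transport_modern := by
  intro input_dict cargo_limit _hdom hpre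
  unfold Spec_greedy_cow_transport_modern greedy_cow_transport_modern greedy_cow_transport_modern_alt
  have hperm : (pvSortedItems input_dict).Perm (PySem.Dict.ofList input_dict).items :=
    PySem.List.sorted_perm _ _ _
  refine trips_eq_ff cargo_limit _ _ (by omega) ?_ ?_
  · exact ((hperm.map Prod.fst).nodup_iff).mpr (PySem.Dict.nodup_keys_ofList input_dict)
  · intro p hp
    exact hpre p.2 (List.mem_map_of_mem (hperm.subset hp))
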